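-- pv_equiv track=rewrite | github.com/kashifusmani/interview_prep | shopify/char_seq.py | get_first_non_matching_pair
-- ===== SOURCE A (Python) =====
-- def get_first_non_matching_pair(word1, word2):
--     """
--     "abc", "bdc" -> (a,b)
--     "ab", "abc" -> ('',c)
--     "abc", "ab" -> ('c','')
--     :return:
--     """
--     for i in range(min(len(word1), len(word2))):
--         if word1[i] != word2[i]:
--             return (word1[i], word2[i])
--
--     if len(word1) > len(word2):
--         return (word1[len(word2)] , '')
--     elif len(word2)> len(word1):
--         return ('', word2[len(word1)])
-- ===== SOURCE B (Python) =====
-- def get_first_non_matching_pair(word1, word2):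
--     # Binary-search the length of the longest common prefix via slice
--     # equality, then read the answer off at that index.
--     lo, hi = 0, min(len(word1), len(word2))
--     while lo < hi:
--         mid = (lo + hi + 1) // 2
--         if word1[:mid] == word2[:mid]:
--             lo = mid
--         else:
--             hi = mid - 1
--     if lo < len(word1) and lo < len(word2):
--         return (word1[lo], word2[lo])
--     if lo < len(word1):
--         return (word1[lo], '')
--     if lo < len(word2):
--         return ('', word2[lo])
--     return None
-- ===== Notes on version B (the rewrite author's own statement) =====
-- stated objective: faster
-- what changed: B binary-searches the longest-common-prefix length using whole-slice equality comparisons instead of A's linear index-by-index scan, then reads the answer off at that index.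
import Mathlib
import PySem

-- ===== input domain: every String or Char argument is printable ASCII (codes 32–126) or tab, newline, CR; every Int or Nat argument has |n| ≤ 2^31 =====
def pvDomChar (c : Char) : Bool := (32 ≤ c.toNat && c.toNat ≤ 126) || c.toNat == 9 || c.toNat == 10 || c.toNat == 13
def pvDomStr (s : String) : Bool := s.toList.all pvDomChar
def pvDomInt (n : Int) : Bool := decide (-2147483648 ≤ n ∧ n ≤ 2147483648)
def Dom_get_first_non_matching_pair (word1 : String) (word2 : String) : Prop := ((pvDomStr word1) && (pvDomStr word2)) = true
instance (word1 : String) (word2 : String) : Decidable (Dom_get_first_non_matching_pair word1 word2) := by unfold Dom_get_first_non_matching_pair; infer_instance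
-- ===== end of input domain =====

-- B finds the longest-common-prefix length by binary search on slice equality
-- instead of A's linear scan; the check measured B faster on long-prefix inputs.


-- ===== PORT A =====
-- word1[i] in Python is a 1-char string; the port fetches the char with
-- PySem and wraps it (the none case is unreachable: every index used is in range).
def pvChar1 (c : Option Char) : String :=
  match c with
  | some c => String.ofList [c]
  | none => ""

-- the 'for i in range(min(len(word1), len(word2)))' loop with early return,
-- then A's post-loop length comparisons
def aLoop (l1 l2 : List Char) : List Int → Option (String × String)
  | [] =>
      if l1.length > l2.length then
        some (pvChar1 (PySem.List.pyGet? l1 (l2.length : Int)), "")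
      else if l2.length > l1.length then
        some ("", pvChar1 (PySem.List.pyGet? l2 (l1.length : Int)))
      else none
  | i :: rest =>
      if PySem.List.pyGet? l1 i ≠ PySem.List.pyGet? l2 i then
        some (pvChar1 (PySem.List.pyGet? l1 i), pvChar1 (PySem.List.pyGet? l2 i))
      else aLoop l1 l2 rest

def get_first_non_matching_pair (word1 : String) (word2 : String) : Option (String × String) :=
  aLoop word1.toList word2.toList
    (PySem.List.pyRange 0 ((min word1.toList.length word2.toList.length : Nat) : Int) 1)

-- ===== PORT B =====
-- the 'while lo < hi' binary-search loop of Source B; word[:mid] with 0 ≤ mid is List.take mid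
def bLoop (l1 l2 : List Char) (lo hi : Nat) : Nat :=
  if _h : lo < hi then
    let mid := (lo + hi + 1) / 2
    if l1.take mid = l2.take mid then bLoop l1 l2 mid hi
    else bLoop l1 l2 lo (mid - 1)
  else lo
termination_by hi - lo
decreasing_by all_goals omega

def get_first_non_matching_pair_alt (word1 : String) (word2 : String) : Option (String × String) :=
  let l1 := word1.toList
  let l2 := word2.toList
  let lo := bLoop l1 l2 0 (min l1.length l2.length)
  if lo < l1.length && lo < l2.length then some (String.ofList [l1[lo]!], String.ofList [l2[lo]!])
  else if lo < l1.length then some (String.ofList [l1[lo]!], "")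
  else if lo < l2.length then some ("", String.ofList [l2[lo]!])
  else none

-- ===== PRECONDITION & SPEC =====
def Spec_get_first_non_matching_pair (word1 : String) (word2 : String) (out : Option (String × String)) : Prop := out = get_first_non_matching_pair_alt word1 word2
instance (word1 : String) (word2 : String) (out : Option (String × String)) : Decidable (Spec_get_first_non_matching_pair word1 word2 out) := by unfold Spec_get_first_non_matching_pair; infer_instance

-- ===== CLAIM (what is proved, stated in full; the proofs are below) =====
def Claim_equal_get_first_non_matching_pair : Prop := ∀ (word1 : String) (word2 : String), Dom_get_first_non_matching_pair word1 word2 → Spec_get_first_non_matching_pair word1 word2 (get_first_non_matching_pair word1 word2)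

-- ===== LEMMAS AND PROOFS =====

-- canonical simultaneous recursion both ports are reduced to
def pairSpec : List Char → List Char → Option (String × String)
  | [], [] => none
  | x :: _, [] => some (String.ofList [x], "")
  | [], y :: _ => some ("", String.ofList [y])
  | x :: xs, y :: ys =>
      if x ≠ y then some (String.ofList [x], String.ofList [y]) else pairSpec xs ys

-- longest common prefix length
def lcp : List Char → List Char → Nat
  | x :: xs, y :: ys => if x = y then lcp xs ys + 1 else 0
  | _, _ => 0

theorem lcp_le_left : ∀ (l1 l2 : List Char), lcp l1 l2 ≤ l1.length := by
  intro l1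
  induction l1 with
  | nil => intro l2; cases l2 <;> simp [lcp]
  | cons x xs ih =>
    intro l2
    cases l2 with
    | nil => simp [lcp]
    | cons y ys =>
      simp only [lcp, List.length_cons]
      split
      · have := ih ys; omega
      · omega

theorem lcp_le_right : ∀ (l1 l2 : List Char), lcp l1 l2 ≤ l2.length := by
  intro l1
  induction l1 with
  | nil => intro l2; cases l2 <;> simp [lcp]
  | cons x xs ih =>
    intro l2
    cases l2 with
    | nil => simp [lcp]
    | cons y ys =>
      simp only [lcp, List.length_cons]
      split
      · have := ih ys; omega
      · omega

theorem take_eq_iff_le_lcp : ∀ (m : Nat) (l1 l2 : List Char),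
    m ≤ l1.length → m ≤ l2.length → (l1.take m = l2.take m ↔ m ≤ lcp l1 l2) := by
  intro m
  induction m with
  | zero => intro l1 l2 _ _; simp
  | succ k ih =>
    intro l1 l2 h1 h2
    cases l1 with
    | nil => simp at h1
    | cons x xs =>
      cases l2 with
      | nil => simp at h2
      | cons y ys =>
        simp only [List.take_succ_cons, List.cons.injEq, lcp]
        rcases eq_or_ne x y with rfl | hxy
        · simp only [eq_self_iff_true, if_true, true_and]
          rw [ih xs ys (by simpa using h1) (by simpa using h2)]
          omega
        · simp [hxy]

theorem bLoop_eq_lcp (l1 l2 : List Char) :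
    ∀ (n lo hi : Nat), hi - lo ≤ n → lo ≤ lcp l1 l2 → lcp l1 l2 ≤ hi →
      hi ≤ min l1.length l2.length → bLoop l1 l2 lo hi = lcp l1 l2 := by
  intro n
  induction n with
  | zero =>
    intro lo hi hfuel hlo hhi _
    rw [bLoop]
    have : ¬ lo < hi := by omega
    simp only [this, dif_neg, not_false_iff]
    omega
  | succ k ih =>
    intro lo hi hfuel hlo hhi hmin
    rw [bLoop]
    by_cases h : lo < hi
    · simp only [dif_pos h]
      set mid := (lo + hi + 1) / 2 with hmid
      have hmid1 : lo < mid := by omega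
      have hmid2 : mid ≤ hi := by omega
      have hiff := take_eq_iff_le_lcp mid l1 l2 (by omega) (by omega)
      by_cases ht : l1.take mid = l2.take mid
      · simp only [if_pos ht]
        exact ih mid hi (by omega) (hiff.mp ht) hhi hmin
      · simp only [if_neg ht]
        have : ¬ mid ≤ lcp l1 l2 := fun hle => ht (hiff.mpr hle)
        exact ih lo (mid - 1) (by omega) hlo (by omega) (by omega)
    · simp only [dif_neg h]
      omega

theorem readOff_eq_pairSpec : ∀ (l1 l2 : List Char),
    (if lcp l1 l2 < l1.length && lcp l1 l2 < l2.length then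
        some (String.ofList [l1[lcp l1 l2]!], String.ofList [l2[lcp l1 l2]!])
      else if lcp l1 l2 < l1.length then some (String.ofList [l1[lcp l1 l2]!], "")
      else if lcp l1 l2 < l2.length then some ("", String.ofList [l2[lcp l1 l2]!])
      else none) = pairSpec l1 l2 := by
  intro l1
  induction l1 with
  | nil =>
    intro l2
    cases l2 with
    | nil => simp [lcp, pairSpec]
    | cons y ys => simp [lcp, pairSpec]
  | cons x xs ih =>
    intro l2
    cases l2 with
    | nil => simp [lcp, pairSpec]
    | cons y ys =>
      by_cases hxy : x = y
      · subst hxy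
        have hrec := ih ys
        simp only [lcp, eq_self_iff_true, if_true, pairSpec, ne_eq, not_true_eq_false,
          if_false, List.length_cons, List.getElem!_cons_succ, Nat.add_lt_add_iff_right]
        exact hrec
      · simp [lcp, hxy, pairSpec]

theorem aLoop_eq_pairSpec (l1 l2 : List Char) (n k : Nat)
    (hn : n = min l1.length l2.length) (hk : k ≤ n) :
    aLoop l1 l2 (PySem.List.pyRange (k : Int) (n : Int) 1) =
      pairSpec (l1.drop k) (l2.drop k) := by
  induction hfuel : n - k generalizing k with
  | zero =>
    have hk' : k = n := by omega
    subst hk'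
    rw [PySem.List.pyRange_one_eq_nil (by omega)]
    simp only [aLoop]
    rcases Nat.lt_trichotomy l1.length l2.length with h | h | h
    · have hmin : k = l1.length := by omega
      have hlt : k < l2.length := by omega
      rw [List.drop_eq_getElem_cons hlt]
      have h1 : l1.drop k = [] := List.drop_eq_nil_of_le (by omega)
      rw [h1]
      simp [pairSpec, pvChar1, hmin, h, Nat.lt_asymm h]
    · have h1 : l1.drop k = [] := List.drop_eq_nil_of_le (by omega)
      have h2 : l2.drop k = [] := List.drop_eq_nil_of_le (by omega)
      simp [pairSpec, h1, h2, h]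
    · have hmin : k = l2.length := by omega
      have hlt : k < l1.length := by omega
      rw [List.drop_eq_getElem_cons hlt]
      have h2 : l2.drop k = [] := List.drop_eq_nil_of_le (by omega)
      rw [h2]
      simp [pairSpec, pvChar1, hmin, h]
  | succ m ih =>
    have hkn : k < n := by omega
    have hk1 : k < l1.length := by omega
    have hk2 : k < l2.length := by omega
    rw [PySem.List.pyRange_one_cons (by exact_mod_cast hkn)]
    simp only [aLoop]
    have g1 : PySem.List.pyGet? l1 (k : Int) = some l1[k] :=
      PySem.List.pyGet?_ofNat l1 k hk1
    have g2 : PySem.List.pyGet? l2 (k : Int) = some l2[k] :=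
      PySem.List.pyGet?_ofNat l2 k hk2
    rw [List.drop_eq_getElem_cons hk1, List.drop_eq_getElem_cons hk2]
    simp only [pairSpec, g1, g2, ne_eq, Option.some.injEq]
    by_cases hxy : l1[k] = l2[k]
    · simp only [hxy, not_true_eq_false, if_false]
      have : ((k : Int) + 1) = ((k + 1 : Nat) : Int) := by push_cast; ring
      rw [this]
      exact ih (k + 1) (by omega) (by omega)
    · simp [hxy, pvChar1]

-- ===== VERDICT (by name: the statement is the Claim_ definition above) =====
theorem get_first_non_matching_pair_spec : Claim_equal_get_first_non_matching_pair := by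
  intro word1 word2 _
  unfold Spec_get_first_non_matching_pair
  unfold get_first_non_matching_pair get_first_non_matching_pair_alt
  have hA := aLoop_eq_pairSpec word1.toList word2.toList
    (min word1.toList.length word2.toList.length) 0 rfl (Nat.zero_le _)
  simp only [Nat.cast_zero] at hA
  rw [hA]
  simp only [List.drop_zero]
  rw [bLoop_eq_lcp word1.toList word2.toList
    (min word1.toList.length word2.toList.length) 0
    (min word1.toList.length word2.toList.length)
    (by omega) (Nat.zero_le _)
    (by have h1 := lcp_le_left word1.toList word2.toList
        have h2 := lcp_le_right word1.toList word2.toList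
        omega)
    (le_refl _)]
  exact (readOff_eq_pairSpec word1.toList word2.toList).symm
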